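-- pv_equiv track=rewrite | github.com/pawelpapis/filmpolski | scrape_filmpolski_years.py | normalize_location_entry
-- ===== SOURCE A (Python) =====
-- from typing import Dict, Iterable, List, Optional, Tuple
--
-- def split_outside_parentheses(text: str) -> List[str]:
--     parts: List[str] = []
--     current: List[str] = []
--     depth = 0
--
--     for ch in text:
--         if ch == "(":
--             depth += 1
--         elif ch == ")" and depth > 0:
--             depth -= 1
--
--         if ch == "," and depth == 0:
--             segment = "".join(current).strip()
--             if segment:
--                 parts.append(segment)
--             current = []
--         else:
--             current.append(ch)
--
--     tail = "".join(current).strip()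
--     if tail:
--         parts.append(tail)
--     return parts
--
-- def normalize_location_entry(entry: str) -> List[str]:
--     entry = entry.strip()
--     open_idx = entry.find("(")
--     close_idx = entry.rfind(")")
--     if open_idx == -1 or close_idx <= open_idx:
--         return [entry]
--
--     city = entry[:open_idx].strip().rstrip(",")
--     inside = entry[open_idx + 1 : close_idx].strip()
--     if not city or not inside:
--         return [entry]
--
--     inner_parts = [part.strip() for part in split_outside_parentheses(inside) if part.strip()]
--     if len(inner_parts) <= 1:
--         return [entry]
--
--     return [f"{city} ({part})" for part in inner_parts]
-- ===== SOURCE B (Python) =====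
-- def _split_merge(text):
--     # over-split on every comma, then merge fragments back while parenthesis
--     # depth (clamped at zero) stays positive; flush whenever depth returns to 0
--     parts = []
--     buf = []
--     depth = 0
--     for frag in text.split(","):
--         for ch in frag:
--             if ch == "(":
--                 depth += 1
--             elif ch == ")" and depth > 0:
--                 depth -= 1
--         buf.append(frag)
--         if depth == 0:
--             seg = ",".join(buf).strip()
--             if seg:
--                 parts.append(seg)
--             buf = []
--     if buf:
--         seg = ",".join(buf).strip()
--         if seg:
--             parts.append(seg)
--     return parts
--
-- def normalize_location_entry(entry):
--     entry = entry.strip()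
--     i = entry.find("(")
--     j = entry.rfind(")")
--     if i != -1 and i < j:
--         city = entry[:i].strip().rstrip(",")
--         parts = _split_merge(entry[i + 1:j].strip())
--         if city and len(parts) > 1:
--             return [f"{city} ({p})" for p in parts]
--     return [entry]
-- ===== Notes on version B (the rewrite author's own statement) =====
-- stated objective: alternative
-- what changed: The char-by-char depth-tracking cutter (accumulating a current buffer and flushing at each top-level comma) is replaced by an over-split-then-merge pass: split the inside at every comma first, then walk the fragments keeping a fragment buffer and a clamped parenthesis depth, flushing the comma-rejoined buffer whenever depth returns to zero; the outer function is also flattened to a single guarded branch, dropping A's redundant empty-inside check and per-part re-strip/filter.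
import Mathlib
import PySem

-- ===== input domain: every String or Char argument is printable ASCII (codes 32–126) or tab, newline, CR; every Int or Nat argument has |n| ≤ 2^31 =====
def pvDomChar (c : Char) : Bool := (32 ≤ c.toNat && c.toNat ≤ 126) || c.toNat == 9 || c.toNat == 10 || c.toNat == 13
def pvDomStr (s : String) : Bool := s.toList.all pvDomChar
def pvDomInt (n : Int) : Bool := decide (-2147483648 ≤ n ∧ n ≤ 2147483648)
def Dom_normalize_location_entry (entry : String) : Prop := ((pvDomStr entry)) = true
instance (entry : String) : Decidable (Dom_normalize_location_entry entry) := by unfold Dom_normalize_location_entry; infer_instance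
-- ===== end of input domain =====

-- B replaces A's char-by-char depth-cutting splitter with a split-on-','-then-merge pass
-- (objective: alternative decomposition, similar cost); A = B on every input.

-- ===== PORT A =====
-- str.rstrip(",") with the explicit chars set ",": drop trailing commas; exact.
def pvRstripComma (cs : List Char) : List Char :=
  (cs.reverse.dropWhile (fun c => c = ',')).reverse

def pvSopStep (st : List (List Char) × List Char × Nat) (ch : Char) :
    List (List Char) × List Char × Nat :=
  let depth := if ch = '(' then st.2.2 + 1 else if ch = ')' ∧ st.2.2 > 0 then st.2.2 - 1 else st.2.2
  if ch = ',' ∧ depth = 0 then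
    let segment := PySem.Chars.strip st.2.1
    (if segment ≠ [] then st.1 ++ [segment] else st.1, [], depth)
  else (st.1, st.2.1 ++ [ch], depth)

def split_outside_parentheses (text : List Char) : List (List Char) :=
  let st := text.foldl pvSopStep ([], [], 0)
  let tail := PySem.Chars.strip st.2.1
  if tail ≠ [] then st.1 ++ [tail] else st.1

def normalize_location_entry (entry : String) : List String :=
  let cs := PySem.Chars.strip entry.toList
  let openIdx := PySem.Chars.find cs ['(']
  let closeIdx := PySem.Chars.rfind cs [')']
  if openIdx = -1 ∨ closeIdx ≤ openIdx then [String.ofList cs]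
  else
    let city := pvRstripComma (PySem.Chars.strip (PySem.List.slice cs none (some openIdx)))
    let inside := PySem.Chars.strip (PySem.List.slice cs (some (openIdx + 1)) (some closeIdx))
    if city = [] ∨ inside = [] then [String.ofList cs]
    else
      let innerParts := ((split_outside_parentheses inside).filter
          (fun p => PySem.Chars.strip p ≠ [])).map PySem.Chars.strip
      if innerParts.length ≤ 1 then [String.ofList cs]
      else innerParts.map (fun p => String.ofList (city ++ (' ' :: '(' :: (p ++ [')']))))

-- ===== PORT B =====
def pvAdvanceDepth (d : Nat) (frag : List Char) : Nat :=
  frag.foldl (fun d ch => if ch = '(' then d + 1 else if ch = ')' ∧ d > 0 then d - 1 else d) d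

def pvMergeStep (st : List (List Char) × List (List Char) × Nat) (frag : List Char) :
    List (List Char) × List (List Char) × Nat :=
  let d := pvAdvanceDepth st.2.2 frag
  let buf := st.2.1 ++ [frag]
  if d = 0 then
    let seg := PySem.Chars.strip (PySem.Chars.join [','] buf)
    (if seg ≠ [] then st.1 ++ [seg] else st.1, [], 0)
  else (st.1, buf, d)

def split_merge (text : List Char) : List (List Char) :=
  let st := (text.splitOn ',').foldl pvMergeStep ([], [], 0)
  if st.2.1 ≠ [] then
    let seg := PySem.Chars.strip (PySem.Chars.join [','] st.2.1)
    if seg ≠ [] then st.1 ++ [seg] else st.1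
  else st.1

def normalize_location_entry_alt (entry : String) : List String :=
  let cs := PySem.Chars.strip entry.toList
  let i := PySem.Chars.find cs ['(']
  let j := PySem.Chars.rfind cs [')']
  if i ≠ -1 ∧ i < j then
    let city := ((PySem.Chars.strip (PySem.List.slice cs none (some i))).reverse.dropWhile
        (fun c => c = ',')).reverse
    let parts := split_merge (PySem.Chars.strip (PySem.List.slice cs (some (i + 1)) (some j)))
    if city ≠ [] ∧ 1 < parts.length then
      parts.map (fun p => String.ofList (city ++ (' ' :: '(' :: (p ++ [')']))))
    else [String.ofList cs]
  else [String.ofList cs]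

-- ===== PRECONDITION & SPEC =====
def Spec_normalize_location_entry (entry : String) (out : List String) : Prop := out = normalize_location_entry_alt entry
instance (entry : String) (out : List String) : Decidable (Spec_normalize_location_entry entry out) := by unfold Spec_normalize_location_entry; infer_instance

-- ===== CLAIM (what is proved, stated in full; the proofs are below) =====
def Claim_equal_normalize_location_entry : Prop := ∀ (entry : String), Dom_normalize_location_entry entry → Spec_normalize_location_entry entry (normalize_location_entry entry)

-- ===== LEMMAS AND PROOFS =====

-- the trailing-comma join of B's buffer: what A's `current` holds at a fragment boundary
def pvJ (buf : List (List Char)) : List Char := (buf.map (fun f => f ++ [','])).flatten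

theorem pvJoin_append_singleton (buf : List (List Char)) (f : List Char) :
    PySem.Chars.join [','] (buf ++ [f]) = pvJ buf ++ f := by
  induction buf with
  | nil => simp [PySem.Chars.join, List.intercalate, pvJ]
  | cons b bs ih =>
    obtain ⟨y, l, hy⟩ : ∃ y l, bs ++ [f] = y :: l := by cases bs <;> exact ⟨_, _, rfl⟩
    simp only [PySem.Chars.join, List.intercalate] at ih ⊢
    rw [List.cons_append, hy, List.intersperse_cons₂, List.flatten_cons, List.flatten_cons, ← hy, ih]
    simp [pvJ]

theorem pvStrip_idem (s : List Char) :
    PySem.Chars.strip (PySem.Chars.strip s) = PySem.Chars.strip s := by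
  set sp := PySem.Chars.isspace with hsp
  set u := List.dropWhile sp s with hu
  set w := List.dropWhile sp u.reverse with hw
  have hts : PySem.Chars.strip s = w.reverse := rfl
  have hpref : w.reverse <+: u := by
    have : w <:+ u.reverse := List.dropWhile_suffix sp
    simpa using this.reverse
  have h1 : List.dropWhile sp w.reverse = w.reverse := by
    cases hwr : w.reverse with
    | nil => simp
    | cons a t =>
      have ha : sp a = false := by
        obtain ⟨r, hr⟩ := hpref
        have hhead : u.head? = some a := by rw [← hr, hwr]; simp
        have hfind : s.find? (fun x => !(sp x)) = some a := by
          rw [List.find?_not_eq_head?_dropWhile sp, ← hu, hhead]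
        have := List.find?_some hfind
        simpa using this
      rw [List.dropWhile_cons_of_neg (by simp [ha])]
  rw [hts]
  show (List.dropWhile sp (List.dropWhile sp w.reverse).reverse).reverse = w.reverse
  rw [h1]
  simp only [List.reverse_reverse]
  rw [hw, List.dropWhile_idempotent]

theorem pvFold_sop_comma_free (frag : List Char) (h : ',' ∉ frag)
    (parts : List (List Char)) (cur : List Char) (d : Nat) :
    frag.foldl pvSopStep (parts, cur, d) = (parts, cur ++ frag, pvAdvanceDepth d frag) := by
  induction frag generalizing cur d with
  | nil => simp [pvAdvanceDepth]
  | cons c t ih =>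
    have hc : c ≠ ',' := fun hc => h (hc ▸ List.mem_cons_self ..)
    have hstep : pvSopStep (parts, cur, d) c
        = (parts, cur ++ [c], if c = '(' then d + 1 else if c = ')' ∧ d > 0 then d - 1 else d) := by
      simp [pvSopStep, hc]
    rw [List.foldl_cons, hstep, ih (fun hm => h (List.mem_cons_of_mem _ hm))]
    simp [pvAdvanceDepth]

theorem pvNotMem_splitOn (xs : List Char) : ∀ f ∈ xs.splitOn ',', ',' ∉ f := by
  have key : ∀ xs : List Char, ∀ f ∈ xs.splitOnP (· == ','), ',' ∉ f := by
    intro xs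
    induction xs with
    | nil => intro f hf; rw [List.splitOnP_nil] at hf; simp at hf; simp [hf]
    | cons x t ih =>
      intro f hf
      rw [List.splitOnP_cons] at hf
      by_cases hx : x = ','
      · simp [hx] at hf
        rcases hf with hf | hf
        · simp [hf]
        · exact ih f hf
      · simp [hx] at hf
        cases ht : t.splitOnP (· == ',') with
        | nil => exact absurd ht (List.splitOnP_ne_nil _ _)
        | cons y l =>
          rw [ht] at hf
          simp only [List.modifyHead] at hf
          rcases List.mem_cons.mp hf with hf | hf
          · subst hf
            intro hm
            rcases List.mem_cons.mp hm with hm | hm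
            · exact hx hm.symm
            · exact ih y (ht ▸ List.mem_cons_self ..) hm
          · exact ih f (ht ▸ List.mem_cons_of_mem _ hf)
  exact key xs

theorem pvMain (fs : List (List Char)) (f : List Char)
    (hf : ',' ∉ f) (hfs : ∀ g ∈ fs, ',' ∉ g)
    (parts buf : List (List Char)) (d : Nat) :
    (let st := ([','].intercalate (f :: fs)).foldl pvSopStep (parts, pvJ buf, d)
     let tail := PySem.Chars.strip st.2.1
     if tail ≠ [] then st.1 ++ [tail] else st.1)
    = (let st := (f :: fs).foldl pvMergeStep (parts, buf, d)
       if st.2.1 ≠ [] then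
         let seg := PySem.Chars.strip (PySem.Chars.join [','] st.2.1)
         if seg ≠ [] then st.1 ++ [seg] else st.1
       else st.1) := by
  induction fs generalizing f parts buf d with
  | nil =>
    have hI1 : [','].intercalate [f] = f := by simp [List.intercalate]
    rw [hI1, pvFold_sop_comma_free f hf]
    simp only [List.foldl_cons, List.foldl_nil]
    by_cases hd : pvAdvanceDepth d f = 0
    · have hm : pvMergeStep (parts, buf, d) f
          = ((if PySem.Chars.strip (pvJ buf ++ f) ≠ [] then
                parts ++ [PySem.Chars.strip (pvJ buf ++ f)] else parts), [], 0) := by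
        simp [pvMergeStep, hd, pvJoin_append_singleton]
      rw [hm]
      by_cases hs : PySem.Chars.strip (pvJ buf ++ f) = [] <;> simp [hs]
    · have hm : pvMergeStep (parts, buf, d) f = (parts, buf ++ [f], pvAdvanceDepth d f) := by
        simp [pvMergeStep, hd]
      rw [hm]
      simp [pvJoin_append_singleton]
  | cons g gs ih =>
    have hI : [','].intercalate (f :: g :: gs) = f ++ [','] ++ [','].intercalate (g :: gs) := by
      simp [List.intercalate]
    rw [hI]
    have hg : ',' ∉ g := hfs g (List.mem_cons_self ..)
    have hgs : ∀ x ∈ gs, ',' ∉ x := fun x hx => hfs x (List.mem_cons_of_mem _ hx)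
    simp only [List.foldl_append, List.foldl_cons, List.foldl_nil]
    rw [pvFold_sop_comma_free f hf]
    by_cases hd : pvAdvanceDepth d f = 0
    · have hstep : pvSopStep (parts, pvJ buf ++ f, pvAdvanceDepth d f) ','
          = ((if PySem.Chars.strip (pvJ buf ++ f) ≠ [] then
                parts ++ [PySem.Chars.strip (pvJ buf ++ f)] else parts), [], 0) := by
        simp [pvSopStep, hd]
      have hmstep : pvMergeStep (parts, buf, d) f
          = ((if PySem.Chars.strip (pvJ buf ++ f) ≠ [] then
                parts ++ [PySem.Chars.strip (pvJ buf ++ f)] else parts), [], 0) := by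
        simp [pvMergeStep, hd, pvJoin_append_singleton]
      rw [hstep, hmstep]
      have := ih g hg hgs
        (if PySem.Chars.strip (pvJ buf ++ f) ≠ [] then
            parts ++ [PySem.Chars.strip (pvJ buf ++ f)] else parts) [] 0
      simpa [pvJ] using this
    · have hstep : pvSopStep (parts, pvJ buf ++ f, pvAdvanceDepth d f) ','
          = (parts, pvJ (buf ++ [f]), pvAdvanceDepth d f) := by
        simp [pvSopStep, hd, pvJ]
      have hmstep : pvMergeStep (parts, buf, d) f = (parts, buf ++ [f], pvAdvanceDepth d f) := by
        simp [pvMergeStep, hd]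
      rw [hstep, hmstep]
      exact ih g hg hgs parts (buf ++ [f]) (pvAdvanceDepth d f)

-- the two splitters agree on every text
theorem pvSplitters_eq (text : List Char) :
    split_outside_parentheses text = split_merge text := by
  cases hsp : text.splitOn ',' with
  | nil => exact absurd hsp (List.splitOnP_ne_nil _ _)
  | cons f fs =>
    have hI : [','].intercalate (f :: fs) = text := by
      rw [← hsp]; exact List.intercalate_splitOn text ','
    have hf := pvNotMem_splitOn text f (hsp ▸ List.mem_cons_self ..)
    have hfs : ∀ g ∈ fs, ',' ∉ g := fun g hg =>
      pvNotMem_splitOn text g (hsp ▸ List.mem_cons_of_mem _ hg)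
    have key := pvMain fs f hf hfs [] [] 0
    simp only [pvJ, List.map_nil, List.flatten_nil] at key
    rw [hI] at key
    simpa [split_outside_parentheses, split_merge, hsp] using key

theorem pvSop_inv (text : List Char) (parts : List (List Char)) (cur : List Char) (d : Nat)
    (h : ∀ p ∈ parts, PySem.Chars.strip p = p ∧ p ≠ []) :
    ∀ p ∈ (text.foldl pvSopStep (parts, cur, d)).1, PySem.Chars.strip p = p ∧ p ≠ [] := by
  induction text generalizing parts cur d with
  | nil => simpa using h
  | cons c t ih =>
    rw [List.foldl_cons]
    by_cases hc : c = ',' ∧ (if c = '(' then d + 1 else if c = ')' ∧ d > 0 then d - 1 else d) = 0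
    · have hstep : pvSopStep (parts, cur, d) c
          = ((if PySem.Chars.strip cur ≠ [] then parts ++ [PySem.Chars.strip cur] else parts), [],
             (if c = '(' then d + 1 else if c = ')' ∧ d > 0 then d - 1 else d)) := by
        simp only [pvSopStep]
        rw [if_pos hc]
      rw [hstep]
      apply ih
      intro p hp
      by_cases hne : PySem.Chars.strip cur ≠ []
      · rw [if_pos hne] at hp
        rcases List.mem_append.mp hp with hp | hp
        · exact h p hp
        · rcases List.mem_singleton.mp hp with rfl
          exact ⟨pvStrip_idem cur, hne⟩
      · rw [if_neg hne] at hp; exact h p hp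
    · have hstep : pvSopStep (parts, cur, d) c
          = (parts, cur ++ [c], (if c = '(' then d + 1 else if c = ')' ∧ d > 0 then d - 1 else d)) := by
        simp only [pvSopStep]
        rw [if_neg hc]
      rw [hstep]
      exact ih _ _ _ h

-- every part A's splitter emits is already stripped and nonempty
theorem pvSop_elems (text : List Char) :
    ∀ p ∈ split_outside_parentheses text, PySem.Chars.strip p = p ∧ p ≠ [] := by
  intro p hp
  simp only [split_outside_parentheses] at hp
  by_cases hne : PySem.Chars.strip (text.foldl pvSopStep ([], [], 0)).2.1 ≠ []
  · rw [if_pos hne] at hp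
    rcases List.mem_append.mp hp with hp | hp
    · exact pvSop_inv text [] [] 0 (by simp) p hp
    · rcases List.mem_singleton.mp hp with rfl
      exact ⟨pvStrip_idem _, hne⟩
  · rw [if_neg hne] at hp
    exact pvSop_inv text [] [] 0 (by simp) p hp

-- A's re-strip-and-drop-empties comprehension is the identity on such parts
theorem pvFilterMap_id (l : List (List Char))
    (h : ∀ p ∈ l, PySem.Chars.strip p = p ∧ p ≠ []) :
    ((l.filter (fun p => PySem.Chars.strip p ≠ [])).map PySem.Chars.strip) = l := by
  induction l with
  | nil => rfl
  | cons a t ih =>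
    obtain ⟨ha1, ha2⟩ := h a (List.mem_cons_self ..)
    rw [List.filter_cons, if_pos (by simpa [ha1] using ha2), List.map_cons, ha1,
      ih (fun p hp => h p (List.mem_cons_of_mem _ hp))]

-- ===== VERDICT (by name: the statement is the Claim_ definition above) =====
theorem normalize_location_entry_spec : Claim_equal_normalize_location_entry := by
  intro entry _
  unfold Spec_normalize_location_entry
  simp only [normalize_location_entry, normalize_location_entry_alt, pvRstripComma]
  set cs := PySem.Chars.strip entry.toList with hcs
  set i := PySem.Chars.find cs ['('] with hi
  set j := PySem.Chars.rfind cs [')'] with hj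
  by_cases h1 : i = -1 ∨ j ≤ i
  · rw [if_pos h1, if_neg (by rintro ⟨hne, hlt⟩; rcases h1 with h1 | h1; exact hne h1; omega)]
  · have hB : i ≠ -1 ∧ i < j :=
      ⟨fun h => h1 (Or.inl h), lt_of_not_ge (fun h => h1 (Or.inr h))⟩
    rw [if_neg h1, if_pos hB]
    set city := ((PySem.Chars.strip (PySem.List.slice cs none (some i))).reverse.dropWhile
        (fun c => c = ',')).reverse with hcity
    set inside := PySem.Chars.strip (PySem.List.slice cs (some (i + 1)) (some j)) with hinside
    have hparts : ((split_outside_parentheses inside).filter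
          (fun p => PySem.Chars.strip p ≠ [])).map PySem.Chars.strip = split_merge inside := by
      rw [pvFilterMap_id _ (pvSop_elems inside), pvSplitters_eq]
    by_cases h2 : city = []
    · rw [if_pos (Or.inl h2), if_neg (by rintro ⟨hc, _⟩; exact hc h2)]
    by_cases h3 : inside = []
    · rw [if_pos (Or.inr h3)]
      have hsm : split_merge inside = [] := by rw [h3]; decide
      rw [if_neg (by rw [hsm]; rintro ⟨_, hlen⟩; simp at hlen)]
    · rw [if_neg (by rintro (hc | hc); exact h2 hc; exact h3 hc), hparts]
      by_cases h4 : (split_merge inside).length ≤ 1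
      · rw [if_pos h4, if_neg (by rintro ⟨_, hlen⟩; omega)]
      · rw [if_neg h4, if_pos ⟨h2, by omega⟩]
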